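-- pv_equiv track=rewrite | github.com/g-enesis/Algorithm_hub | Python/백준/Silver/16173. 점프왕 쩰리 （Small）/점프왕 쩰리 （Small）.py | can_reach_goal
-- ===== SOURCE A (Python) =====
-- def can_reach_goal(N, board):
--     # DFS를 사용하기 위한 스택
--     stack = [(0, 0)]  # 출발점 (0, 0)에서 시작
--     visited = [[False] * N for _ in range(N)]  # 방문 여부 체크
--
--     # DFS로 탐색
--     while stack:
--         x, y = stack.pop()
--
--         # 목표 지점에 도달하면 "HaruHaru" 출력
--         if board[x][y] == -1:
--             return "HaruHaru"
--
--         # 이미 방문한 칸이면 패스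
--         if visited[x][y]:
--             continue
--
--         visited[x][y] = True  # 방문 처리
--         jump = board[x][y]  # 현재 칸에서 이동할 수 있는 거리
--
--         # 오른쪽으로 이동
--         if y + jump < N and not visited[x][y + jump]:
--             stack.append((x, y + jump))
--
--         # 아래로 이동
--         if x + jump < N and not visited[x + jump][y]:
--             stack.append((x + jump, y))
--
--     # 끝까지 도달하지 못한 경우 "Hing" 출력
--     return "Hing"
-- ===== SOURCE B (Python) =====
-- def can_reach_goal(N, board):
--     # Recursive DFS over the same grid: the explicit stack of A is replaced by
--     # the call stack; same visited grid, same right/down move rules.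
--     visited = [[False] * N for _ in range(N)]
--
--     def dfs(x, y):
--         if board[x][y] == -1:
--             return True
--         if visited[x][y]:
--             return False
--         visited[x][y] = True
--         jump = board[x][y]
--         if y + jump < N and dfs(x, y + jump):
--             return True
--         if x + jump < N and dfs(x + jump, y):
--             return True
--         return False
--
--     return "HaruHaru" if dfs(0, 0) else "Hing"
-- ===== Notes on version B (the rewrite author's own statement) =====
-- stated objective: alternative
-- what changed: Replaces A's explicit-stack worklist DFS by a recursive DFS over the same N x N visited grid (call-stack recursion, short-circuit try of the right move then the down move); the traversal order differs but the reachability answer is the same.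
-- outside the precondition, e.g. on can_reach_goal(2, [[1, -3], [-1, 1]]): A returns 'HaruHaru', B raises IndexError; on can_reach_goal(2, [[1, 5], [7]]): A returns 'Hing', B returns 'Hing'
import Mathlib
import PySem

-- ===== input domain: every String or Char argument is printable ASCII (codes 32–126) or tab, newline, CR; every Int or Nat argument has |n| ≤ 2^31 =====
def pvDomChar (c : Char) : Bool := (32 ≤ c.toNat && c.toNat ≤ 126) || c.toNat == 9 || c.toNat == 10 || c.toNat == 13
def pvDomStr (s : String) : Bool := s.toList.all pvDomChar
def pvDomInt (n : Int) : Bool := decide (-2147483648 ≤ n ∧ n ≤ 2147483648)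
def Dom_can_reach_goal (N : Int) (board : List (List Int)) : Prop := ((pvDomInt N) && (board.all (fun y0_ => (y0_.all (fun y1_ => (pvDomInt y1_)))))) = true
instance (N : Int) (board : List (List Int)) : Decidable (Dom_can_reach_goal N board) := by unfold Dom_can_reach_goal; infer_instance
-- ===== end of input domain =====

-- B replaces A's explicit stack DFS by a recursive DFS (call-stack recursion, short-circuit
-- or of the two moves) over the same visited grid; objective: alternative, same O(N^2) cost.

-- Shared grid-indexing helpers for the ports.
-- Python `m[x][y]` read; exact for 0 ≤ x,y in range (the only reads made under Pre_;
-- Python raises/wraps outside, which Pre_ excludes).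
def pvGet2 (m : List (List Int)) (x y : Int) : Int :=
  ((m[x.toNat]?.getD [])[y.toNat]?.getD 0)

-- Python `v[x][y]` read on the visited grid (same exactness domain as pvGet2).
def pvVGet (v : List (List Bool)) (x y : Int) : Bool :=
  ((v[x.toNat]?.getD [])[y.toNat]?.getD false)

-- Python `v[x][y] = True`; exact for 0 ≤ x,y in range.
def pvVSet (v : List (List Bool)) (x y : Int) : List (List Bool) :=
  v.set x.toNat ((v[x.toNat]?.getD []).set y.toNat true)

-- ===== PORT A =====
-- A's while-loop over an explicit stack (head of the list = top of the Python list);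
-- fuel bounds the iteration count (3·N²+2 is proved sufficient below; the 0-fuel
-- branch is never reached under Pre_).
def canReachLoopA (N : Int) (board : List (List Int)) :
    Nat → List (Int × Int) → List (List Bool) → String
  | 0, _, _ => "Hing"
  | _ + 1, [], _ => "Hing"
  | f + 1, (x, y) :: rest, visited =>
    if pvGet2 board x y = -1 then "HaruHaru"
    else if pvVGet visited x y then canReachLoopA N board f rest visited
    else
      let visited' := pvVSet visited x y
      let jump := pvGet2 board x y
      -- right move pushed first, down move pushed second (so the down move is on top)
      let s1 := if y + jump < N ∧ pvVGet visited' x (y + jump) = false then (x, y + jump) :: rest else rest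
      let s2 := if x + jump < N ∧ pvVGet visited' (x + jump) y = false then (x + jump, y) :: s1 else s1
      canReachLoopA N board f s2 visited'

def can_reach_goal (N : Int) (board : List (List Int)) : String :=
  canReachLoopA N board (3 * N.toNat * N.toNat + 2) [(0, 0)]
    (List.replicate N.toNat (List.replicate N.toNat false))

-- ===== PORT B =====
-- B's recursive dfs; the threaded grid is Python's shared mutable `visited`;
-- fuel bounds the recursion depth (N²+1 is proved sufficient below).
def canReachDfsB (N : Int) (board : List (List Int)) :
    Nat → Int → Int → List (List Bool) → Bool × List (List Bool)
  | 0, _, _, v => (false, v)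
  | f + 1, x, y, visited =>
    if pvGet2 board x y = -1 then (true, visited)
    else if pvVGet visited x y then (false, visited)
    else
      let visited1 := pvVSet visited x y
      let jump := pvGet2 board x y
      if y + jump < N then
        match canReachDfsB N board f x (y + jump) visited1 with
        | (true, v2) => (true, v2)
        | (false, v2) =>
          if x + jump < N then canReachDfsB N board f (x + jump) y v2
          else (false, v2)
      else if x + jump < N then canReachDfsB N board f (x + jump) y visited1
      else (false, visited1)

def can_reach_goal_alt (N : Int) (board : List (List Int)) : String :=
  if (canReachDfsB N board (N.toNat * N.toNat + 1) 0 0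
      (List.replicate N.toNat (List.replicate N.toNat false))).1
  then "HaruHaru" else "Hing"

-- ===== PRECONDITION & SPEC =====
-- Pre_ admits (i) N ≥ 1 boards whose top-left N×N block exists and contains only values
-- ≥ -1, and (ii) boards whose start cell alone decides the run (it is the goal, or its
-- jump is 0 or ≥ N so nothing else is ever read); outside this A either raises
-- IndexError, or returns a value produced by Python's negative-index wraparound / an
-- accidentally in-bounds walk on a mis-sized board, where the explored cells depend on
-- the traversal order and A's value is an implementation accident.
def Pre_can_reach_goal (N : Int) (board : List (List Int)) : Prop :=
  (1 ≤ N ∧ N ≤ (board.length : Int) ∧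
    ∀ row ∈ board.take N.toNat,
      N ≤ (row.length : Int) ∧ ∀ v ∈ row.take N.toNat, -1 ≤ v) ∨
  (0 < board.length ∧ 0 < (board[0]?.getD []).length ∧
    ((board[0]?.getD [])[0]?.getD 0 = -1 ∨
     (1 ≤ N ∧ ((board[0]?.getD [])[0]?.getD 0 = 0 ∨ N ≤ (board[0]?.getD [])[0]?.getD 0))))

instance (N : Int) (board : List (List Int)) : Decidable (Pre_can_reach_goal N board) := by
  unfold Pre_can_reach_goal; infer_instance

def pvWitness_can_reach_goal : Int × List (List Int) := (2, [[1, 0], [1, -1]])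

def Spec_can_reach_goal (N : Int) (board : List (List Int)) (out : String) : Prop := out = can_reach_goal_alt N board
instance (N : Int) (board : List (List Int)) (out : String) : Decidable (Spec_can_reach_goal N board out) := by unfold Spec_can_reach_goal; infer_instance

-- ===== CLAIM (what is proved, stated in full; the proofs are below) =====
def Claim_equal_can_reach_goal : Prop := ∀ (N : Int) (board : List (List Int)), Dom_can_reach_goal N board → Pre_can_reach_goal N board → Spec_can_reach_goal N board (can_reach_goal N board)

-- ===== LEMMAS AND PROOFS =====

-- the main (well-formed) disjunct of Pre_can_reach_goal
def pvPreMain (N : Int) (board : List (List Int)) : Prop :=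
  1 ≤ N ∧ N ≤ (board.length : Int) ∧
    ∀ row ∈ board.take N.toNat,
      N ≤ (row.length : Int) ∧ ∀ v ∈ row.take N.toNat, -1 ≤ v

-- (x, y) lies in the N×N block, as Int coordinates.
def pvInR (N x y : Int) : Prop := 0 ≤ x ∧ x < N ∧ 0 ≤ y ∧ y < N

-- Cells reachable from (0,0) by the right/down jump moves.
inductive pvReach (N : Int) (board : List (List Int)) : Int → Int → Prop
  | start : pvReach N board 0 0
  | right {x y : Int} : pvReach N board x y → pvGet2 board x y ≠ -1 →
      y + pvGet2 board x y < N → pvReach N board x (y + pvGet2 board x y)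
  | down {x y : Int} : pvReach N board x y → pvGet2 board x y ≠ -1 →
      x + pvGet2 board x y < N → pvReach N board (x + pvGet2 board x y) y

-- "some reachable cell is the goal"
def pvGoalReach (N : Int) (board : List (List Int)) : Prop :=
  ∃ x y, pvReach N board x y ∧ pvGet2 board x y = -1

def pvGridWF (N : Int) (v : List (List Bool)) : Prop :=
  v.length = N.toNat ∧ ∀ r ∈ v, r.length = N.toNat

def pvUnvis (N : Int) (v : List (List Bool)) : Nat :=
  ((Finset.range N.toNat ×ˢ Finset.range N.toNat).filter
    (fun p => ¬ pvVGet v (p.1 : Int) (p.2 : Int) = true)).card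

theorem pv_val_ge (N : Int) (board : List (List Int))
    (hP : pvPreMain N board) {x y : Int} (h : pvInR N x y) :
    -1 ≤ pvGet2 board x y := by
  obtain ⟨h1, h2, h3⟩ := hP
  obtain ⟨hx0, hxN, hy0, hyN⟩ := h
  have hxlen : x.toNat < board.length := by omega
  have hrow : board[x.toNat]? = some board[x.toNat] := List.getElem?_eq_getElem hxlen
  have hmem : board[x.toNat] ∈ board.take N.toNat := by
    refine List.mem_of_getElem? (i := x.toNat) ?_
    rw [List.getElem?_take_of_lt (by omega)]; exact hrow
  obtain ⟨hrl, hrv⟩ := h3 _ hmem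
  have hylen : y.toNat < board[x.toNat].length := by omega
  have hent : board[x.toNat][y.toNat]? = some board[x.toNat][y.toNat] := List.getElem?_eq_getElem hylen
  have hvm : board[x.toNat][y.toNat] ∈ board[x.toNat].take N.toNat := by
    refine List.mem_of_getElem? (i := y.toNat) ?_
    rw [List.getElem?_take_of_lt (by omega)]; exact hent
  have := hrv _ hvm
  simpa [pvGet2, hrow, hent] using this

theorem pv_reach_inR (N : Int) (board : List (List Int))
    (hP : pvPreMain N board) {x y : Int} (h : pvReach N board x y) :
    pvInR N x y := by
  obtain ⟨h1, h2, h3⟩ := hP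
  induction h with
  | start => exact ⟨le_refl 0, by omega, le_refl 0, by omega⟩

  | right h hne hlt ih =>
    have hv := pv_val_ge N board ⟨h1, h2, h3⟩ ih
    obtain ⟨a1, a2, a3, a4⟩ := ih
    exact ⟨a1, a2, by omega, hlt⟩
  | down h hne hlt ih =>
    have hv := pv_val_ge N board ⟨h1, h2, h3⟩ ih
    obtain ⟨a1, a2, a3, a4⟩ := ih
    exact ⟨by omega, hlt, a3, a4⟩

theorem pv_gridwf_init (N : Int) :
    pvGridWF N (List.replicate N.toNat (List.replicate N.toNat false)) := by
  refine ⟨by simp, ?_⟩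
  intro r hr
  rw [List.eq_of_mem_replicate hr]; simp

theorem pv_vget_init (N : Int) (x y : Int) :
    pvVGet (List.replicate N.toNat (List.replicate N.toNat false)) x y = false := by
  simp only [pvVGet, List.getElem?_replicate]
  split <;> simp

theorem pv_vset_wf (N : Int) (v : List (List Bool)) (x y : Int)
    (h : pvGridWF N v) : pvGridWF N (pvVSet v x y) := by
  obtain ⟨hl, hr⟩ := h
  by_cases hx : x.toNat < v.length
  · refine ⟨by simpa [pvVSet] using hl, ?_⟩
    intro r hrm
    rcases List.mem_or_eq_of_mem_set hrm with hm | he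
    · exact hr r hm
    · subst he
      have : v[x.toNat]? = some v[x.toNat] := List.getElem?_eq_getElem hx
      rw [this]
      simp [hr _ (List.getElem_mem hx)]
  · rw [pvVSet, List.set_eq_of_length_le (by omega)]
    exact ⟨hl, hr⟩

theorem pv_vget_vset (N : Int) (v : List (List Bool)) {x y a b : Int}
    (hwf : pvGridWF N v) (hx : pvInR N x y) (ha : pvInR N a b) :
    (pvVGet (pvVSet v x y) a b = true ↔ ((a = x ∧ b = y) ∨ pvVGet v a b = true)) := by
  obtain ⟨hl, hr⟩ := hwf
  obtain ⟨hx0, hxN, hy0, hyN⟩ := hx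
  obtain ⟨ha0, haN, hb0, hbN⟩ := ha
  have hxl : x.toNat < v.length := by omega
  have hrowq : v[x.toNat]? = some v[x.toNat] := List.getElem?_eq_getElem hxl
  have hrlen : v[x.toNat].length = N.toNat := hr _ (List.getElem_mem hxl)
  by_cases hax : a.toNat = x.toNat
  · have hae : a = x := by omega
    by_cases hby : b.toNat = y.toNat
    · have hbe : b = y := by omega
      simp only [pvVGet, pvVSet, hrowq, Option.getD_some]
      rw [hax, hby, List.getElem?_set_self hxl]
      simp only [Option.getD_some]
      rw [List.getElem?_set_self (by omega : y.toNat < v[x.toNat].length)]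
      simp [hae, hbe]
    · have hbne : ¬ (b = y) := by omega
      simp only [pvVGet, pvVSet, hrowq, Option.getD_some]
      rw [hax, List.getElem?_set_self hxl]
      simp only [Option.getD_some]
      rw [List.getElem?_set_ne (by omega : y.toNat ≠ b.toNat)]
      simp [hrowq, hbne]
  · have hane : ¬ (a = x) := by omega
    simp only [pvVGet, pvVSet]
    rw [List.getElem?_set_ne (by omega : x.toNat ≠ a.toNat)]
    simp [hane]

theorem pv_unvis_vset_lt (N : Int) (v : List (List Bool)) {x y : Int}
    (hwf : pvGridWF N v) (h : pvInR N x y) (hfresh : ¬ pvVGet v x y = true) :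
    pvUnvis N (pvVSet v x y) < pvUnvis N v := by
  obtain ⟨hx0, hxN, hy0, hyN⟩ := h
  apply Finset.card_lt_card
  rw [Finset.ssubset_iff_of_subset]
  · refine ⟨(x.toNat, y.toNat), ?_, ?_⟩
    · simp only [Finset.mem_filter, Finset.mem_product, Finset.mem_range]
      refine ⟨⟨by omega, by omega⟩, ?_⟩
      have : pvVGet v (↑x.toNat) (↑y.toNat) = pvVGet v x y := by
        unfold pvVGet
        rw [show ((x.toNat : Int)).toNat = x.toNat by omega,
            show ((y.toNat : Int)).toNat = y.toNat by omega]
      rw [this]; exact hfresh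
    · simp only [Finset.mem_filter, Finset.mem_product, Finset.mem_range, not_and, and_imp]
      intro _ _
      have hin' : pvInR N (↑x.toNat : Int) (↑y.toNat : Int) := by
        refine ⟨by omega, by omega, by omega, by omega⟩
      have hxy : pvInR N x y := ⟨hx0, hxN, hy0, hyN⟩
      have := (pv_vget_vset N v hwf hxy hin').mpr (Or.inl ⟨by omega, by omega⟩)
      simp only [not_not]
      exact this
  · intro p hp
    simp only [Finset.mem_filter, Finset.mem_product, Finset.mem_range] at hp ⊢
    obtain ⟨⟨h1, h2⟩, hnv⟩ := hp
    refine ⟨⟨h1, h2⟩, ?_⟩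
    intro hvt
    apply hnv
    have hin' : pvInR N (↑p.1 : Int) (↑p.2 : Int) := ⟨by omega, by omega, by omega, by omega⟩
    exact (pv_vget_vset N v hwf ⟨hx0, hxN, hy0, hyN⟩ hin').mpr (Or.inr hvt)

theorem pv_unvis_le_sq (N : Int) (v : List (List Bool)) :
    pvUnvis N v ≤ N.toNat * N.toNat := by
  refine le_trans (Finset.card_filter_le _ _) ?_
  simp [Finset.card_product]

theorem pv_inR_right (N : Int) (board : List (List Int)) (hP : pvPreMain N board)
    {x y : Int} (h : pvInR N x y) (hne : pvGet2 board x y ≠ -1)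
    (hlt : y + pvGet2 board x y < N) : pvInR N x (y + pvGet2 board x y) := by
  have := pv_val_ge N board hP h
  obtain ⟨a1, a2, a3, a4⟩ := h
  exact ⟨a1, a2, by omega, hlt⟩

theorem pv_inR_down (N : Int) (board : List (List Int)) (hP : pvPreMain N board)
    {x y : Int} (h : pvInR N x y) (hne : pvGet2 board x y ≠ -1)
    (hlt : x + pvGet2 board x y < N) : pvInR N (x + pvGet2 board x y) y := by
  have := pv_val_ge N board hP h
  obtain ⟨a1, a2, a3, a4⟩ := h
  exact ⟨by omega, hlt, a3, a4⟩

-- a visited set that contains (0,0), is sound, and is move-closed rules out any reachable goal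
theorem pv_closed_noGoal (N : Int) (board : List (List Int))
    (hP : pvPreMain N board) (v : List (List Bool))
    (hv00 : pvVGet v 0 0 = true)
    (HV : ∀ x y : Int, pvInR N x y → pvVGet v x y = true →
      pvReach N board x y ∧ pvGet2 board x y ≠ -1 ∧
      (y + pvGet2 board x y < N → pvVGet v x (y + pvGet2 board x y) = true) ∧
      (x + pvGet2 board x y < N → pvVGet v (x + pvGet2 board x y) y = true)) :
    ¬ pvGoalReach N board := by
  rintro ⟨x, y, hr, hg⟩
  have all : ∀ a b : Int, pvReach N board a b → pvVGet v a b = true := by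
    intro a b h
    induction h with
    | start => exact hv00
    | right h hne hlt ih => exact (HV _ _ (pv_reach_inR N board hP h) ih).2.2.1 hlt
    | down h hne hlt ih => exact (HV _ _ (pv_reach_inR N board hP h) ih).2.2.2 hlt
  exact (HV _ _ (pv_reach_inR N board hP hr) (all _ _ hr)).2.1 hg

-- A's loop returns only the two strings.
theorem pv_loopA_values (N : Int) (board : List (List Int)) :
    ∀ (f : Nat) (s : List (Int × Int)) (v : List (List Bool)),
      canReachLoopA N board f s v = "HaruHaru" ∨ canReachLoopA N board f s v = "Hing" := by
  intro f
  induction f with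
  | zero => intro s v; right; rfl
  | succ f ih =>
    intro s v
    match s with
    | [] => right; rfl
    | (x, y) :: rest =>
      simp only [canReachLoopA]
      split
      · left; rfl
      · split
        · exact ih rest v
        · exact ih _ _

-- Main invariant lemma for A's worklist loop.
theorem pv_loopA_correct (N : Int) (board : List (List Int))
    (hP : pvPreMain N board) :
    ∀ (f : Nat) (s : List (Int × Int)) (v : List (List Bool)),
      pvGridWF N v →
      3 * pvUnvis N v + s.length ≤ f →
      (∀ p ∈ s, pvReach N board p.1 p.2) →
      (∀ x y : Int, pvInR N x y → pvVGet v x y = true →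
        pvReach N board x y ∧ pvGet2 board x y ≠ -1 ∧
        (y + pvGet2 board x y < N →
          (pvVGet v x (y + pvGet2 board x y) = true ∨ (x, y + pvGet2 board x y) ∈ s)) ∧
        (x + pvGet2 board x y < N →
          (pvVGet v (x + pvGet2 board x y) y = true ∨ (x + pvGet2 board x y, y) ∈ s))) →
      ((0, 0) ∈ s ∨ pvVGet v 0 0 = true) →
      (canReachLoopA N board f s v = "HaruHaru" ↔ pvGoalReach N board) := by
  intro f
  induction f with
  | zero =>
    intro s v hwf hfuel hS hV h0
    have hs : s = [] := by
      cases s with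
      | nil => rfl
      | cons a t => simp only [List.length_cons] at hfuel; omega
    subst hs
    have hv0 : pvVGet v 0 0 = true := by
      rcases h0 with h | h
      · cases h
      · exact h
    refine iff_of_false (by simp [canReachLoopA]) ?_
    apply pv_closed_noGoal N board hP v hv0
    intro x y hin hv
    obtain ⟨hr, hne, hc1, hc2⟩ := hV x y hin hv
    refine ⟨hr, hne, ?_, ?_⟩
    · intro hlt
      rcases hc1 hlt with h | h
      · exact h
      · cases h
    · intro hlt
      rcases hc2 hlt with h | h
      · exact h
      · cases h
  | succ f ih =>
    intro s v hwf hfuel hS hV h0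
    cases s with
    | nil =>
      have hv0 : pvVGet v 0 0 = true := by
        rcases h0 with h | h
        · cases h
        · exact h
      refine iff_of_false (by simp [canReachLoopA]) ?_
      apply pv_closed_noGoal N board hP v hv0
      intro x y hin hv
      obtain ⟨hr, hne, hc1, hc2⟩ := hV x y hin hv
      refine ⟨hr, hne, ?_, ?_⟩
      · intro hlt
        rcases hc1 hlt with h | h
        · exact h
        · cases h
      · intro hlt
        rcases hc2 hlt with h | h
        · exact h
        · cases h
    | cons p rest =>
      obtain ⟨x, y⟩ := p
      have hxy : pvReach N board x y := hS (x, y) (List.mem_cons_self ..)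
      have hin : pvInR N x y := pv_reach_inR N board hP hxy
      have hval := pv_val_ge N board hP hin
      have h1N : (1 : Int) ≤ N := hP.1
      by_cases hgoal : pvGet2 board x y = -1
      · rw [show canReachLoopA N board (f + 1) ((x, y) :: rest) v = "HaruHaru" from by
          simp only [canReachLoopA]; rw [if_pos hgoal]]
        exact iff_of_true rfl ⟨x, y, hxy, hgoal⟩
      · by_cases hvis : pvVGet v x y = true
        · rw [show canReachLoopA N board (f + 1) ((x, y) :: rest) v =
              canReachLoopA N board f rest v from by
            simp only [canReachLoopA]; rw [if_neg hgoal, if_pos hvis]]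
          apply ih rest v hwf
          · simp only [List.length_cons] at hfuel; omega
          · intro q hq; exact hS q (List.mem_cons_of_mem _ hq)
          · intro a b hinab hvab
            obtain ⟨hr, hne, hc1, hc2⟩ := hV a b hinab hvab
            refine ⟨hr, hne, ?_, ?_⟩
            · intro hlt
              rcases hc1 hlt with h | h
              · exact Or.inl h
              · rw [List.mem_cons] at h
                rcases h with h | h
                · cases h; exact Or.inl hvis
                · exact Or.inr h
            · intro hlt
              rcases hc2 hlt with h | h
              · exact Or.inl h
              · rw [List.mem_cons] at h
                rcases h with h | h
                · cases h; exact Or.inl hvis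
                · exact Or.inr h
          · rcases h0 with h | h
            · rw [List.mem_cons] at h
              rcases h with h | h
              · cases h; exact Or.inr hvis
              · exact Or.inl h
            · exact Or.inr h
        · have hwf' := pv_vset_wf N v x y hwf
          have hvv : ∀ {a b : Int}, pvInR N a b →
              (pvVGet (pvVSet v x y) a b = true ↔ ((a = x ∧ b = y) ∨ pvVGet v a b = true)) :=
            fun ha => pv_vget_vset N v hwf hin ha
          have hu' := pv_unvis_vset_lt N v hwf hin hvis
          have hxyv' : pvVGet (pvVSet v x y) x y = true := (hvv hin).mpr (Or.inl ⟨rfl, rfl⟩)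
          have main : ∀ s2 : List (Int × Int), s2.length ≤ rest.length + 2 →
              (∀ q ∈ rest, q ∈ s2) →
              (∀ q ∈ s2, pvReach N board q.1 q.2) →
              (y + pvGet2 board x y < N →
                (pvVGet (pvVSet v x y) x (y + pvGet2 board x y) = true ∨ (x, y + pvGet2 board x y) ∈ s2)) →
              (x + pvGet2 board x y < N →
                (pvVGet (pvVSet v x y) (x + pvGet2 board x y) y = true ∨ (x + pvGet2 board x y, y) ∈ s2)) →
              (canReachLoopA N board f s2 (pvVSet v x y) = "HaruHaru" ↔ pvGoalReach N board) := by
            intro s2 hlen hsub hreach hcr hcd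
            apply ih s2 (pvVSet v x y) hwf'
            · simp only [List.length_cons] at hfuel; omega
            · exact hreach
            · intro a b hinab hvab
              rcases (hvv hinab).mp hvab with ⟨hea, heb⟩ | hold
              · subst hea; subst heb
                exact ⟨hxy, hgoal, fun hlt => hcr hlt, fun hlt => hcd hlt⟩
              · obtain ⟨hr, hne, hc1, hc2⟩ := hV a b hinab hold
                refine ⟨hr, hne, ?_, ?_⟩
                · intro hlt
                  have hintgt := pv_inR_right N board hP hinab hne hlt
                  rcases hc1 hlt with h | h
                  · exact Or.inl ((hvv hintgt).mpr (Or.inr h))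
                  · rw [List.mem_cons] at h
                    rcases h with h | h
                    · cases h; exact Or.inl hxyv'
                    · exact Or.inr (hsub _ h)
                · intro hlt
                  have hintgt := pv_inR_down N board hP hinab hne hlt
                  rcases hc2 hlt with h | h
                  · exact Or.inl ((hvv hintgt).mpr (Or.inr h))
                  · rw [List.mem_cons] at h
                    rcases h with h | h
                    · cases h; exact Or.inl hxyv'
                    · exact Or.inr (hsub _ h)
            · rcases h0 with h | h
              · rw [List.mem_cons] at h
                rcases h with h | h
                · cases h; exact Or.inr hxyv'
                · exact Or.inl (hsub _ h)
              · refine Or.inr ((hvv ⟨le_refl 0, by omega, le_refl 0, by omega⟩).mpr (Or.inr h))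
          simp only [canReachLoopA]
          rw [if_neg hgoal, if_neg hvis]
          by_cases hrp : y + pvGet2 board x y < N ∧ pvVGet (pvVSet v x y) x (y + pvGet2 board x y) = false
          · by_cases hdp : x + pvGet2 board x y < N ∧ pvVGet (pvVSet v x y) (x + pvGet2 board x y) y = false
            · rw [if_pos hrp, if_pos hdp]
              apply main
              · simp
              · intro q hq; exact List.mem_cons_of_mem _ (List.mem_cons_of_mem _ hq)
              · intro q hq
                rw [List.mem_cons, List.mem_cons] at hq
                rcases hq with h | h | h
                · rw [h]; exact pvReach.down hxy hgoal hdp.1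
                · rw [h]; exact pvReach.right hxy hgoal hrp.1
                · exact hS q (List.mem_cons_of_mem _ h)
              · intro _; exact Or.inr (List.mem_cons_of_mem _ (List.mem_cons_self ..))
              · intro _; exact Or.inr (List.mem_cons_self ..)
            · rw [if_pos hrp, if_neg hdp]
              apply main
              · simp
              · intro q hq; exact List.mem_cons_of_mem _ hq
              · intro q hq
                rw [List.mem_cons] at hq
                rcases hq with h | h
                · rw [h]; exact pvReach.right hxy hgoal hrp.1
                · exact hS q (List.mem_cons_of_mem _ h)
              · intro _; exact Or.inr (List.mem_cons_self ..)
              · intro hlt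
                left
                cases hb : pvVGet (pvVSet v x y) (x + pvGet2 board x y) y with
                | true => rfl
                | false => exact absurd ⟨hlt, hb⟩ hdp
          · by_cases hdp : x + pvGet2 board x y < N ∧ pvVGet (pvVSet v x y) (x + pvGet2 board x y) y = false
            · rw [if_neg hrp, if_pos hdp]
              apply main
              · simp
              · intro q hq; exact List.mem_cons_of_mem _ hq
              · intro q hq
                rw [List.mem_cons] at hq
                rcases hq with h | h
                · rw [h]; exact pvReach.down hxy hgoal hdp.1
                · exact hS q (List.mem_cons_of_mem _ h)
              · intro hlt
                left
                cases hb : pvVGet (pvVSet v x y) x (y + pvGet2 board x y) with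
                | true => rfl
                | false => exact absurd ⟨hlt, hb⟩ hrp
              · intro _; exact Or.inr (List.mem_cons_self ..)
            · rw [if_neg hrp, if_neg hdp]
              apply main
              · simp
              · intro q hq; exact hq
              · intro q hq; exact hS q (List.mem_cons_of_mem _ hq)
              · intro hlt
                left
                cases hb : pvVGet (pvVSet v x y) x (y + pvGet2 board x y) with
                | true => rfl
                | false => exact absurd ⟨hlt, hb⟩ hrp
              · intro hlt
                left
                cases hb : pvVGet (pvVSet v x y) (x + pvGet2 board x y) y with
                | true => rfl
                | false => exact absurd ⟨hlt, hb⟩ hdp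

-- Main invariant lemma for B's recursive dfs.
theorem pv_dfsB_correct (N : Int) (board : List (List Int))
    (hP : pvPreMain N board) :
    ∀ (f : Nat) (x y : Int) (v : List (List Bool)),
      pvGridWF N v →
      pvInR N x y →
      pvReach N board x y →
      (∀ a b : Int, pvInR N a b → pvVGet v a b = true →
        pvReach N board a b ∧ pvGet2 board a b ≠ -1) →
      pvUnvis N v + 1 ≤ f →
      (pvGridWF N (canReachDfsB N board f x y v).2 ∧
       (∀ a b : Int, pvInR N a b → pvVGet v a b = true →
          pvVGet (canReachDfsB N board f x y v).2 a b = true) ∧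
       (∀ a b : Int, pvInR N a b → pvVGet (canReachDfsB N board f x y v).2 a b = true →
          pvReach N board a b ∧ pvGet2 board a b ≠ -1) ∧
       pvUnvis N (canReachDfsB N board f x y v).2 ≤ pvUnvis N v ∧
       ((canReachDfsB N board f x y v).1 = true → pvGoalReach N board) ∧
       ((canReachDfsB N board f x y v).1 = false →
          pvVGet (canReachDfsB N board f x y v).2 x y = true ∧
          ∀ a b : Int, pvInR N a b →
            pvVGet (canReachDfsB N board f x y v).2 a b = true → ¬ pvVGet v a b = true →
            (b + pvGet2 board a b < N →
              pvVGet (canReachDfsB N board f x y v).2 a (b + pvGet2 board a b) = true) ∧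
            (a + pvGet2 board a b < N →
              pvVGet (canReachDfsB N board f x y v).2 (a + pvGet2 board a b) b = true))) := by
  intro f
  induction f with
  | zero =>
    intro x y v _ _ _ _ hfuel
    omega
  | succ f ih =>
    intro x y v hwf hin hreach hsound hfuel
    by_cases hgoal : pvGet2 board x y = -1
    · have hres : canReachDfsB N board (f + 1) x y v = (true, v) := by
        simp only [canReachDfsB]; rw [if_pos hgoal]
      rw [hres]
      refine ⟨hwf, fun a b _ hv => hv, hsound, le_refl _, fun _ => ⟨x, y, hreach, hgoal⟩, ?_⟩
      intro hfalse
      simp at hfalse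
    · by_cases hvis : pvVGet v x y = true
      · have hres : canReachDfsB N board (f + 1) x y v = (false, v) := by
          simp only [canReachDfsB]; rw [if_neg hgoal, if_pos hvis]
        rw [hres]
        refine ⟨hwf, fun a b _ hv => hv, hsound, le_refl _, by intro h; simp at h, ?_⟩
        intro _
        refine ⟨hvis, ?_⟩
        intro a b _ hv hnv
        exact absurd hv hnv
      · -- fresh cell: mark it
        have hwf1 := pv_vset_wf N v x y hwf
        have hvv : ∀ {a b : Int}, pvInR N a b →
            (pvVGet (pvVSet v x y) a b = true ↔ ((a = x ∧ b = y) ∨ pvVGet v a b = true)) :=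
          fun ha => pv_vget_vset N v hwf hin ha
        have hu1 := pv_unvis_vset_lt N v hwf hin hvis
        have hxyv1 : pvVGet (pvVSet v x y) x y = true := (hvv hin).mpr (Or.inl ⟨rfl, rfl⟩)
        have hmono1 : ∀ a b : Int, pvInR N a b → pvVGet v a b = true →
            pvVGet (pvVSet v x y) a b = true :=
          fun a b ha hv => (hvv ha).mpr (Or.inr hv)
        have hsound1 : ∀ a b : Int, pvInR N a b → pvVGet (pvVSet v x y) a b = true →
            pvReach N board a b ∧ pvGet2 board a b ≠ -1 := by
          intro a b hinab hv
          rcases (hvv hinab).mp hv with ⟨hea, heb⟩ | hold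
          · subst hea; subst heb; exact ⟨hreach, hgoal⟩
          · exact hsound a b hinab hold
        by_cases hr : y + pvGet2 board x y < N
        · have H1 := ih x (y + pvGet2 board x y) (pvVSet v x y) hwf1
            (pv_inR_right N board hP hin hgoal hr)
            (pvReach.right hreach hgoal hr) hsound1 (by omega)
          rcases hEq : canReachDfsB N board f x (y + pvGet2 board x y) (pvVSet v x y) with ⟨b2, v2⟩
          rw [hEq] at H1
          obtain ⟨wf2, mono2, sound2, hu2, htrue2, hfalse2⟩ := H1
          cases b2 with
          | true =>
            have hu2' : pvUnvis N v2 ≤ pvUnvis N (pvVSet v x y) := hu2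
            have hres : canReachDfsB N board (f + 1) x y v = (true, v2) := by
              simp only [canReachDfsB]; rw [if_neg hgoal, if_neg hvis, if_pos hr, hEq]
            rw [hres]
            refine ⟨wf2, ?_, sound2, by omega, fun _ => htrue2 rfl, ?_⟩
            · intro a b ha hv; exact mono2 a b ha (hmono1 a b ha hv)
            · intro h; simp at h
          | false =>
            have hu2' : pvUnvis N v2 ≤ pvUnvis N (pvVSet v x y) := hu2
            have hf2 := hfalse2 rfl
            by_cases hd : x + pvGet2 board x y < N
            · have H2 := ih (x + pvGet2 board x y) y v2 wf2
                (pv_inR_down N board hP hin hgoal hd)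
                (pvReach.down hreach hgoal hd) sound2 (by omega)
              rcases hEq2 : canReachDfsB N board f (x + pvGet2 board x y) y v2 with ⟨b3, v3⟩
              rw [hEq2] at H2
              obtain ⟨wf3, mono3, sound3, hu3, htrue3, hfalse3⟩ := H2
              have hu3' : pvUnvis N v3 ≤ pvUnvis N v2 := hu3
              have hres : canReachDfsB N board (f + 1) x y v = (b3, v3) := by
                simp only [canReachDfsB]
                rw [if_neg hgoal, if_neg hvis, if_pos hr, hEq]
                show (if x + pvGet2 board x y < N
                    then canReachDfsB N board f (x + pvGet2 board x y) y v2
                    else (false, v2)) = (b3, v3)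
                rw [if_pos hd, hEq2]
              rw [hres]
              refine ⟨wf3, ?_, sound3, by omega, fun h => htrue3 h, ?_⟩
              · intro a b ha hv; exact mono3 a b ha (mono2 a b ha (hmono1 a b ha hv))
              · intro hb3
                refine ⟨mono3 x y hin (mono2 x y hin hxyv1), ?_⟩
                intro a b hinab hv3 hnv
                by_cases h2 : pvVGet v2 a b = true
                · by_cases h1 : pvVGet (pvVSet v x y) a b = true
                  · rcases (hvv hinab).mp h1 with ⟨hea, heb⟩ | hold
                    · subst hea; subst heb
                      constructor
                      · intro hltr
                        exact mono3 a (b + pvGet2 board a b)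
                          (pv_inR_right N board hP hinab hgoal hltr) hf2.1
                      · intro _
                        exact (hfalse3 hb3).1
                    · exact absurd hold hnv
                  · have hcl := hf2.2 a b hinab h2 h1
                    have hs2 := sound2 a b hinab h2
                    constructor
                    · intro hlt
                      exact mono3 a (b + pvGet2 board a b)
                        (pv_inR_right N board hP hinab hs2.2 hlt) (hcl.1 hlt)
                    · intro hlt
                      exact mono3 (a + pvGet2 board a b) b
                        (pv_inR_down N board hP hinab hs2.2 hlt) (hcl.2 hlt)
                · exact (hfalse3 hb3).2 a b hinab hv3 h2
            · have hres : canReachDfsB N board (f + 1) x y v = (false, v2) := by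
                simp only [canReachDfsB]
                rw [if_neg hgoal, if_neg hvis, if_pos hr, hEq]
                show (if x + pvGet2 board x y < N
                    then canReachDfsB N board f (x + pvGet2 board x y) y v2
                    else (false, v2)) = (false, v2)
                rw [if_neg hd]
              rw [hres]
              refine ⟨wf2, ?_, sound2, by omega, by intro h; simp at h, ?_⟩
              · intro a b ha hv; exact mono2 a b ha (hmono1 a b ha hv)
              · intro _
                refine ⟨mono2 x y hin hxyv1, ?_⟩
                intro a b hinab hv2 hnv
                by_cases h1 : pvVGet (pvVSet v x y) a b = true
                · rcases (hvv hinab).mp h1 with ⟨hea, heb⟩ | hold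
                  · subst hea; subst heb
                    constructor
                    · intro _
                      exact hf2.1
                    · intro hltd
                      exact absurd hltd hd
                  · exact absurd hold hnv
                · exact hf2.2 a b hinab hv2 h1
        · by_cases hd : x + pvGet2 board x y < N
          · have H2 := ih (x + pvGet2 board x y) y (pvVSet v x y) hwf1
              (pv_inR_down N board hP hin hgoal hd)
              (pvReach.down hreach hgoal hd) hsound1 (by omega)
            rcases hEq2 : canReachDfsB N board f (x + pvGet2 board x y) y (pvVSet v x y) with ⟨b2, v2⟩
            rw [hEq2] at H2
            obtain ⟨wf2, mono2, sound2, hu2, htrue2, hfalse2⟩ := H2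
            have hu2' : pvUnvis N v2 ≤ pvUnvis N (pvVSet v x y) := hu2
            have hres : canReachDfsB N board (f + 1) x y v = (b2, v2) := by
              simp only [canReachDfsB]
              rw [if_neg hgoal, if_neg hvis, if_neg hr, if_pos hd, hEq2]
            rw [hres]
            refine ⟨wf2, ?_, sound2, by omega, fun h => htrue2 h, ?_⟩
            · intro a b ha hv; exact mono2 a b ha (hmono1 a b ha hv)
            · intro hb2
              refine ⟨mono2 x y hin hxyv1, ?_⟩
              intro a b hinab hv2 hnv
              by_cases h1 : pvVGet (pvVSet v x y) a b = true
              · rcases (hvv hinab).mp h1 with ⟨hea, heb⟩ | hold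
                · subst hea; subst heb
                  constructor
                  · intro hltr
                    exact absurd hltr hr
                  · intro _
                    exact (hfalse2 hb2).1
                · exact absurd hold hnv
              · exact (hfalse2 hb2).2 a b hinab hv2 h1
          · have hres : canReachDfsB N board (f + 1) x y v = (false, pvVSet v x y) := by
              simp only [canReachDfsB]
              rw [if_neg hgoal, if_neg hvis, if_neg hr, if_neg hd]
            rw [hres]
            refine ⟨hwf1, hmono1, hsound1,
              by show pvUnvis N (pvVSet v x y) ≤ pvUnvis N v; omega,
              by intro h; simp at h, ?_⟩
            intro _
            refine ⟨hxyv1, ?_⟩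
            intro a b hinab hv1 hnv
            rcases (hvv hinab).mp hv1 with ⟨hea, heb⟩ | hold
            · subst hea; subst heb
              exact ⟨fun hltr => absurd hltr hr, fun hltd => absurd hltd hd⟩
            · exact absurd hold hnv

theorem pv_A_iff (N : Int) (board : List (List Int)) (hP : pvPreMain N board) :
    (can_reach_goal N board = "HaruHaru" ↔ pvGoalReach N board) := by
  unfold can_reach_goal
  apply pv_loopA_correct N board hP
  · exact pv_gridwf_init N
  · have := pv_unvis_le_sq N (List.replicate N.toNat (List.replicate N.toNat false))
    simp only [List.length_cons, List.length_nil]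
    have h2 : 3 * N.toNat * N.toNat = 3 * (N.toNat * N.toNat) := by ring
    omega
  · intro p hp
    simp only [List.mem_singleton] at hp
    rw [hp]
    exact pvReach.start
  · intro x y _ hv
    rw [pv_vget_init] at hv
    cases hv
  · left; simp

theorem pv_B_iff (N : Int) (board : List (List Int)) (hP : pvPreMain N board) :
    (can_reach_goal_alt N board = "HaruHaru" ↔ pvGoalReach N board) := by
  have h1 : (1 : Int) ≤ N := hP.1
  have hin00 : pvInR N 0 0 := ⟨le_refl 0, by omega, le_refl 0, by omega⟩
  obtain ⟨wf', mono', sound', hu', htrue', hfalse'⟩ :=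
    pv_dfsB_correct N board hP (N.toNat * N.toNat + 1) 0 0
      (List.replicate N.toNat (List.replicate N.toNat false))
      (pv_gridwf_init N) hin00 pvReach.start
      (by intro a b _ hv; rw [pv_vget_init] at hv; cases hv)
      (by have := pv_unvis_le_sq N (List.replicate N.toNat (List.replicate N.toNat false)); omega)
  unfold can_reach_goal_alt
  cases hc : (canReachDfsB N board (N.toNat * N.toNat + 1) 0 0
      (List.replicate N.toNat (List.replicate N.toNat false))).1 with
  | true =>
    rw [if_pos rfl]
    exact iff_of_true rfl (htrue' hc)
  | false =>
    rw [if_neg (by simp)]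
    refine iff_of_false (by simp) ?_
    obtain ⟨h00, hclo⟩ := hfalse' hc
    refine pv_closed_noGoal N board hP _ h00 ?_
    intro a b hin hv
    have hs := sound' a b hin hv
    have hc2 := hclo a b hin hv (by rw [pv_vget_init]; simp)
    exact ⟨hs.1, hs.2, hc2.1, hc2.2⟩

theorem pv_loopA_nil (N : Int) (board : List (List Int)) :
    ∀ (g : Nat) (v : List (List Bool)), canReachLoopA N board g [] v = "Hing" := by
  intro g v
  cases g <;> rfl

-- degenerate case: the start cell is the goal — both programs answer before touching anything else
theorem pv_deg_goal (N : Int) (board : List (List Int))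
    (hj : pvGet2 board 0 0 = -1) :
    can_reach_goal N board = can_reach_goal_alt N board := by
  have hA : can_reach_goal N board = "HaruHaru" := by
    unfold can_reach_goal
    show canReachLoopA N board (3 * N.toNat * N.toNat + 1 + 1) [(0, 0)]
      (List.replicate N.toNat (List.replicate N.toNat false)) = "HaruHaru"
    simp only [canReachLoopA]
    rw [if_pos hj]
  have hB : can_reach_goal_alt N board = "HaruHaru" := by
    unfold can_reach_goal_alt
    simp only [canReachDfsB]
    rw [if_pos hj]
    simp
  rw [hA, hB]

-- degenerate case: the start cell jumps nowhere (jump 0 or ≥ N) — both programs answer "Hing"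
theorem pv_deg_stuck (N : Int) (board : List (List Int))
    (h1N : 1 ≤ N) (hcase : pvGet2 board 0 0 = 0 ∨ N ≤ pvGet2 board 0 0) :
    can_reach_goal N board = can_reach_goal_alt N board := by
  have hj0 : ¬ pvGet2 board 0 0 = -1 := by omega
  have hwfI := pv_gridwf_init N
  have hin00 : pvInR N 0 0 := ⟨le_refl 0, by omega, le_refl 0, by omega⟩
  have hv1 : pvVGet (pvVSet (List.replicate N.toNat (List.replicate N.toNat false)) 0 0) 0 0 = true :=
    (pv_vget_vset N _ hwfI hin00 hin00).mpr (Or.inl ⟨rfl, rfl⟩)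
  have hA : can_reach_goal N board = "Hing" := by
    unfold can_reach_goal
    show canReachLoopA N board (3 * N.toNat * N.toNat + 1 + 1) [(0, 0)]
      (List.replicate N.toNat (List.replicate N.toNat false)) = "Hing"
    simp only [canReachLoopA]
    rw [if_neg hj0, if_neg (by rw [pv_vget_init]; simp)]
    rw [if_neg ?_, if_neg ?_, pv_loopA_nil]
    · rintro ⟨hlt, hfeq⟩
      rcases hcase with hc | hc
      · rw [show (0 : Int) + pvGet2 board 0 0 = 0 by omega, hv1] at hfeq
        cases hfeq
      · omega
    · rintro ⟨hlt, hfeq⟩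
      rcases hcase with hc | hc
      · rw [show (0 : Int) + pvGet2 board 0 0 = 0 by omega, hv1] at hfeq
        cases hfeq
      · omega
  have hB : can_reach_goal_alt N board = "Hing" := by
    obtain ⟨g, hg⟩ : ∃ g, N.toNat * N.toNat = g + 1 := by
      have h1 : 1 ≤ N.toNat := by omega
      have h2 : 1 * 1 ≤ N.toNat * N.toNat := Nat.mul_le_mul h1 h1
      exact ⟨N.toNat * N.toNat - 1, by omega⟩
    have key : canReachDfsB N board (N.toNat * N.toNat + 1) 0 0
        (List.replicate N.toNat (List.replicate N.toNat false)) =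
        (false, pvVSet (List.replicate N.toNat (List.replicate N.toNat false)) 0 0) := by
      rcases hcase with hc | hc
      · have hinner : canReachDfsB N board (g + 1) 0 0
            (pvVSet (List.replicate N.toNat (List.replicate N.toNat false)) 0 0) =
            (false, pvVSet (List.replicate N.toNat (List.replicate N.toNat false)) 0 0) := by
          simp only [canReachDfsB]
          rw [if_neg hj0, if_pos hv1]
        simp only [canReachDfsB]
        rw [if_neg hj0, if_neg (by rw [pv_vget_init]; simp), hc]
        rw [show ((0 : Int) + 0) = 0 by decide]
        rw [if_pos (show (0 : Int) < N by omega), hg, hinner]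
        show (if (0 : Int) < N then
            canReachDfsB N board (g + 1) 0 0
              (pvVSet (List.replicate N.toNat (List.replicate N.toNat false)) 0 0)
          else (false, pvVSet (List.replicate N.toNat (List.replicate N.toNat false)) 0 0)) =
          (false, pvVSet (List.replicate N.toNat (List.replicate N.toNat false)) 0 0)
        rw [if_pos (show (0 : Int) < N by omega), hinner]
      · simp only [canReachDfsB]
        rw [if_neg hj0, if_neg (by rw [pv_vget_init]; simp),
          if_neg (show ¬ ((0 : Int) + pvGet2 board 0 0 < N) by omega),
          if_neg (show ¬ ((0 : Int) + pvGet2 board 0 0 < N) by omega)]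
    unfold can_reach_goal_alt
    rw [key]
    simp
  rw [hA, hB]

-- ===== VERDICT (by name: the statement is the Claim_ definition above) =====
theorem can_reach_goal_spec : Claim_equal_can_reach_goal := by
  intro N board _hD hPre
  unfold Spec_can_reach_goal
  rcases hPre with hP | ⟨hb0, hr0, hj⟩
  case inr =>
    have hjv : pvGet2 board 0 0 = (board[0]?.getD [])[0]?.getD 0 := rfl
    rcases hj with hj | ⟨h1N, hj⟩
    · exact pv_deg_goal N board (by rw [hjv, hj])
    · exact pv_deg_stuck N board h1N (by rw [hjv]; exact hj)
  have hA := pv_A_iff N board hP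
  have hB := pv_B_iff N board hP
  by_cases hG : pvGoalReach N board
  · rw [hA.mpr hG, (hB.mpr hG)]
  · have hA' : can_reach_goal N board = "Hing" := by
      rcases pv_loopA_values N board (3 * N.toNat * N.toNat + 2) [(0, 0)]
        (List.replicate N.toNat (List.replicate N.toNat false)) with h | h
      · exact absurd (hA.mp h) hG
      · exact h
    have hB' : can_reach_goal_alt N board = "Hing" := by
      have hv : can_reach_goal_alt N board = "HaruHaru" ∨ can_reach_goal_alt N board = "Hing" := by
        unfold can_reach_goal_alt; split <;> simp
      rcases hv with h | h
      · exact absurd (hB.mp h) hG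
      · exact h
    rw [hA', hB']
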